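-- pv_equiv track=rewrite | github.com/lopezac/TP_TDA | tp1.py | es_culpable
-- ===== SOURCE A (Python) =====
-- def es_culpable(transacciones, tiempos_sospechosos):
--     resultado = []
--     valores = dic_transacciones(transacciones)
--     transacciones_ord = ordenar_tiempos(transacciones)
--     for i in range(len(tiempos_sospechosos)):
--
--         hay_candidato = False
--
--         for j in range(len(transacciones_ord)):
--             cota_inferior = transacciones_ord[j][0] - transacciones_ord[j][1]
--             cota_superior = transacciones_ord[j][0] + transacciones_ord[j][1]
--
--             if (tiempos_sospechosos[i] >= cota_inferior and tiempos_sospechosos[i] <= cota_superior and valores[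
--                 transacciones_ord[j]] > 0):
--                 valores[transacciones_ord[j]] -= 1
--                 resultado.append((tiempos_sospechosos[i], transacciones_ord[j]))
--                 hay_candidato = True
--                 break
--
--         if not hay_candidato:
--             return None
--
--     return resultado
--
-- def dic_transacciones(t):
--     dic = {}
--     for tran in t:
--         dic[tran] = dic.get(tran, 0) + 1
--     return dic
--
-- def ordenar_tiempos(t):
--     t = sorted(t, key=lambda punto: (punto[0] + punto[1]))
--     return t
-- ===== SOURCE B (Python) =====
-- def es_culpable(transacciones, tiempos_sospechosos):
--     counts = {}
--     for tran in transacciones: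
--         if tran in counts:
--             counts[tran] += 1
--         else:
--             counts[tran] = 1
--     resultado = []
--     for t in tiempos_sospechosos:
--         mejor = None
--         for tran, c in counts.items():
--             if c > 0 and tran[0] - tran[1] <= t <= tran[0] + tran[1]:
--                 if mejor is None or tran[0] + tran[1] < mejor[0] + mejor[1]:
--                     mejor = tran
--         if mejor is None:
--             return None
--         counts[mejor] -= 1
--         resultado.append((t, mejor))
--     return resultado
-- ===== Notes on version B (the rewrite author's own statement) =====
-- stated objective: alternative
-- what changed: Instead of stably sorting the transactions by upper bound and scanning the full sorted list (with a separate count dict) until the first covering entry with remaining capacity, B never sorts: it counts multiplicities once and, for each suspicious time, does a single running-minimum scan over the distinct transactions, keeping the first item with the smallest upper bound that covers the time and still has capacity.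
import Mathlib
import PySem

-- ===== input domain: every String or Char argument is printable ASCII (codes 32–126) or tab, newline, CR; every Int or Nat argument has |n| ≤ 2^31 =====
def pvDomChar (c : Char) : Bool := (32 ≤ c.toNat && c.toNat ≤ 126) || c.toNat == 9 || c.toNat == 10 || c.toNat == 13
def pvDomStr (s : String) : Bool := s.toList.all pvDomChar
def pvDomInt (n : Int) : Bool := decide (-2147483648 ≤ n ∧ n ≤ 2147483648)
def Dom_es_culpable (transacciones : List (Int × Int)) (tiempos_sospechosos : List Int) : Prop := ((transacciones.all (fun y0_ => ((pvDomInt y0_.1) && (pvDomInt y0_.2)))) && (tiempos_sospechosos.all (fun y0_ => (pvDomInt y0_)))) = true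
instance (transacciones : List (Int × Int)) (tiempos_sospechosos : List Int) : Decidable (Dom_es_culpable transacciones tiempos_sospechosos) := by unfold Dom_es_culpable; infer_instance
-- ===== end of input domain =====

-- B replaces A's sort-then-scan (stable sort by upper bound, then for each suspicious time a
-- linear scan over the sorted transaction list guided by a count dict) with a single running
-- minimum scan over the distinct transactions and their remaining counts (no sort): objective
-- 'alternative'; not claimed faster.


-- ===== PORT A =====
-- dic_transacciones: counting dict keyed by the transaction pair
def pvDicTransacciones (t : List (Int × Int)) : PySem.Dict (Int × Int) Int :=
  t.foldl (fun dic tran => dic.insert tran (dic.getD tran 0 + 1)) PySem.Dict.empty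

-- ordenar_tiempos: sorted(t, key=lambda punto: punto[0] + punto[1])
def pvOrdenarTiempos (t : List (Int × Int)) : List (Int × Int) :=
  PySem.List.sorted t (fun punto => punto.1 + punto.2)

-- A's inner j-loop with break: first entry of the sorted list covering the time whose count is
-- still positive.  (The Python reads valores[tran]: the key is always present — every scanned
-- tran is a key of the dict built from the same list — so getD is exact here.)
def pvBuscarA (ord : List (Int × Int)) (valores : PySem.Dict (Int × Int) Int) (ti : Int) :
    Option (Int × Int) :=
  match ord with
  | [] => none
  | tr :: rest =>
      if ti ≥ tr.1 - tr.2 ∧ ti ≤ tr.1 + tr.2 ∧ valores.getD tr 0 > 0 then some tr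
      else pvBuscarA rest valores ti

-- A's outer i-loop: state = (valores, resultado); early `return None` when no candidate
def pvLoopA (ord : List (Int × Int)) (ts : List Int) (valores : PySem.Dict (Int × Int) Int)
    (resultado : List (Int × (Int × Int))) : Option (List (Int × (Int × Int))) :=
  match ts with
  | [] => some resultado
  | ti :: rest =>
      match pvBuscarA ord valores ti with
      | none => none
      | some tr => pvLoopA ord rest (valores.insert tr (valores.getD tr 0 - 1))
          (resultado ++ [(ti, tr)])

def es_culpable (transacciones : List (Int × Int)) (tiempos_sospechosos : List Int) :
    Option (List (Int × (Int × Int))) :=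
  pvLoopA (pvOrdenarTiempos transacciones) tiempos_sospechosos (pvDicTransacciones transacciones) []

-- ===== PORT B =====
-- if tran in counts: counts[tran] += 1 else: counts[tran] = 1
def pvCountsB (transacciones : List (Int × Int)) : PySem.Dict (Int × Int) Int :=
  transacciones.foldl (fun counts tran =>
    if counts.contains tran then counts.insert tran (counts.getD tran 0 + 1)
    else counts.insert tran 1) PySem.Dict.empty

-- B's inner loop over counts.items(): running best (mejor) — smallest upper bound wins,
-- the first such item on ties
def pvMejorB (items : List ((Int × Int) × Int)) (t : Int) : Option (Int × Int) :=
  items.foldl (fun (mejor : Option (Int × Int)) (p : (Int × Int) × Int) =>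
    if p.2 > 0 ∧ p.1.1 - p.1.2 ≤ t ∧ t ≤ p.1.1 + p.1.2 then
      match mejor with
      | none => some p.1
      | some m => if p.1.1 + p.1.2 < m.1 + m.2 then some p.1 else mejor
    else mejor) none

-- B's outer loop over tiempos_sospechosos
def pvLoopB (ts : List Int) (counts : PySem.Dict (Int × Int) Int)
    (resultado : List (Int × (Int × Int))) : Option (List (Int × (Int × Int))) :=
  match ts with
  | [] => some resultado
  | t :: rest =>
      match pvMejorB counts.items t with
      | none => none
      | some m => pvLoopB rest (counts.insert m (counts.getD m 0 - 1)) (resultado ++ [(t, m)])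

def es_culpable_alt (transacciones : List (Int × Int)) (tiempos_sospechosos : List Int) :
    Option (List (Int × (Int × Int))) :=
  pvLoopB tiempos_sospechosos (pvCountsB transacciones) []

-- ===== PRECONDITION & SPEC =====
def Spec_es_culpable (transacciones : List (Int × Int)) (tiempos_sospechosos : List Int) (out : Option (List (Int × (Int × Int)))) : Prop := out = es_culpable_alt transacciones tiempos_sospechosos
instance (transacciones : List (Int × Int)) (tiempos_sospechosos : List Int) (out : Option (List (Int × (Int × Int)))) : Decidable (Spec_es_culpable transacciones tiempos_sospechosos out) := by unfold Spec_es_culpable; infer_instance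

-- ===== CLAIM (what is proved, stated in full; the proofs are below) =====
def Claim_equal_es_culpable : Prop := ∀ (transacciones : List (Int × Int)) (tiempos_sospechosos : List Int), Dom_es_culpable transacciones tiempos_sospechosos → Spec_es_culpable transacciones tiempos_sospechosos (es_culpable transacciones tiempos_sospechosos)

-- ===== LEMMAS AND PROOFS =====

-- the per-step selection predicate: covers the time and has remaining count
def pvQ (d : PySem.Dict (Int × Int) Int) (t : Int) (x : Int × Int) : Bool :=
  decide (t ≥ x.1 - x.2 ∧ t ≤ x.1 + x.2 ∧ d.getD x 0 > 0)

def pvPick : List (Int × Int) → Option (Int × Int)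
  | [] => none
  | x :: rest =>
      match pvPick rest with
      | none => some x
      | some r => if r.1 + r.2 < x.1 + x.2 then some r else some x

theorem pvPick_eq_none {l : List (Int × Int)} : pvPick l = none ↔ l = [] := by
  cases l with
  | nil => simp [pvPick]
  | cons x rest =>
      simp only [pvPick]
      cases h : pvPick rest
      · simp
      · simp only []; split <;> simp

theorem pvPick_mem : ∀ {l : List (Int × Int)} {r : Int × Int}, pvPick l = some r → r ∈ l := by
  intro l
  induction l with
  | nil => intro r h; simp [pvPick] at h
  | cons x rest ih =>
      intro r h
      simp only [pvPick] at h
      cases hp : pvPick rest with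
      | none => rw [hp] at h; simp at h; simp [h]
      | some r' =>
          rw [hp] at h
          by_cases hlt : r'.1 + r'.2 < x.1 + x.2
          · simp [hlt] at h
            subst h; exact List.mem_cons_of_mem _ (ih hp)
          · simp [hlt] at h
            subst h; exact List.mem_cons_self

theorem pvPick_isMin : ∀ {l : List (Int × Int)} {r : Int × Int}, pvPick l = some r →
    ∀ y ∈ l, r.1 + r.2 ≤ y.1 + y.2 := by
  intro l
  induction l with
  | nil => intro r h; simp [pvPick] at h
  | cons x rest ih =>
      intro r h y hy
      simp only [pvPick] at h
      cases hp : pvPick rest with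
      | none =>
          rw [hp] at h; simp at h; subst h
          rcases List.mem_cons.mp hy with rfl | hy'
          · omega
          · rw [pvPick_eq_none.mp hp] at hy'; simp at hy'
      | some r' =>
          rw [hp] at h
          by_cases hlt : r'.1 + r'.2 < x.1 + x.2
          · simp [hlt] at h; subst h
            rcases List.mem_cons.mp hy with rfl | hy'
            · omega
            · exact ih hp y hy'
          · simp [hlt] at h; subst h
            rcases List.mem_cons.mp hy with rfl | hy'
            · omega
            · have := ih hp y hy'; omega

theorem pvPick_append_singleton (l : List (Int × Int)) (x : Int × Int) :
    pvPick (l ++ [x]) =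
      match pvPick l with
      | none => some x
      | some r => if x.1 + x.2 < r.1 + r.2 then some x else some r := by
  induction l with
  | nil => simp [pvPick]
  | cons y rest ih =>
      simp only [List.cons_append, pvPick, ih]
      cases hp : pvPick rest with
      | none => simp
      | some r =>
          by_cases h1 : x.1 + x.2 < r.1 + r.2 <;>
            by_cases h2 : r.1 + r.2 < y.1 + y.2 <;>
              simp only [if_pos, if_neg, h1, h2, if_false] <;>
                split_ifs <;> first | rfl | omega

theorem pvInsertBy_find (x : Int × Int) (Q : (Int × Int) → Bool) :
    ∀ (L : List (Int × Int)), L.Pairwise (fun a b => a.1 + a.2 ≤ b.1 + b.2) →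
    (PySem.List.insertBy (fun a b => decide (a.1 + a.2 < b.1 + b.2)) x L).find? Q =
      if Q x then
        (match L.find? Q with
         | none => some x
         | some m => if m.1 + m.2 ≤ x.1 + x.2 then some m else some x)
      else L.find? Q := by
  intro L
  induction L with
  | nil =>
      intro _
      cases h : Q x <;> simp [PySem.List.insertBy, List.find?, h]
  | cons y ys ih =>
      intro hp
      have hpy : ∀ z ∈ ys, y.1 + y.2 ≤ z.1 + z.2 := (List.pairwise_cons.mp hp).1
      have hpt : ys.Pairwise (fun a b => a.1 + a.2 ≤ b.1 + b.2) := (List.pairwise_cons.mp hp).2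
      rw [show PySem.List.insertBy (fun a b => decide (a.1 + a.2 < b.1 + b.2)) x (y :: ys)
          = if x.1 + x.2 < y.1 + y.2 then x :: y :: ys
            else y :: PySem.List.insertBy (fun a b => decide (a.1 + a.2 < b.1 + b.2)) x ys by
        simp [PySem.List.insertBy]]
      by_cases hxy : x.1 + x.2 < y.1 + y.2
      · rw [if_pos hxy]
        cases hqx : Q x with
        | false =>
            simp only [if_false, Bool.false_eq_true]
            rw [List.find?_cons_of_neg (by simp [hqx])]
        | true =>
            rw [List.find?_cons_of_pos (by simp [hqx])]
            simp only [if_true]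
            cases hf : (y :: ys).find? Q with
            | none => rfl
            | some m =>
                have hm : m ∈ y :: ys := List.mem_of_find?_eq_some hf
                have : y.1 + y.2 ≤ m.1 + m.2 := by
                  rcases List.mem_cons.mp hm with rfl | hm'
                  · omega
                  · exact hpy m hm'
                have hgt : ¬ (m.1 + m.2 ≤ x.1 + x.2) := by omega
                simp [hgt]
      · rw [if_neg hxy]
        cases hqy : Q y with
        | true =>
            rw [List.find?_cons_of_pos hqy, List.find?_cons_of_pos hqy]
            cases hqx : Q x <;> simp
            omega
        | false =>
            rw [List.find?_cons_of_neg (by simp [hqy]), List.find?_cons_of_neg (by simp [hqy])]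
            exact ih hpt

theorem pvFilter_add (Q : (Int × Int) → Bool) (s : List (Int × Int)) (x : Int × Int) :
    (PySem.Set.add s x).filter Q =
      if Q x then PySem.Set.add (s.filter Q) x else s.filter Q := by
  simp only [PySem.Set.add, PySem.Set.contains]
  by_cases hc : s.contains x <;> cases hq : Q x <;>
    simp_all [List.filter_append, List.mem_filter]

theorem pvFilter_foldl_add (Q : (Int × Int) → Bool) (l : List (Int × Int)) :
    ∀ (s : List (Int × Int)),
    (l.foldl PySem.Set.add s).filter Q = (l.filter Q).foldl PySem.Set.add (s.filter Q) := by
  induction l with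
  | nil => intro s; rfl
  | cons x rest ih =>
      intro s
      simp only [List.foldl_cons, List.filter_cons]
      rw [ih, pvFilter_add]
      cases hq : Q x <;> simp

theorem pvFilter_ofList (Q : (Int × Int) → Bool) (l : List (Int × Int)) :
    (PySem.Set.ofList l).filter Q = PySem.Set.ofList (l.filter Q) := by
  rw [PySem.Set.ofList_eq_foldl, PySem.Set.ofList_eq_foldl, pvFilter_foldl_add]
  rfl

theorem pvPick_add (s : List (Int × Int)) (x : Int × Int) :
    pvPick (PySem.Set.add s x) =
      match pvPick s with
      | none => some x
      | some r => if x.1 + x.2 < r.1 + r.2 then some x else some r := by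
  simp only [PySem.Set.add]
  by_cases hc : PySem.Set.contains s x
  · rw [if_pos hc]
    have hmem : x ∈ s := by
      simpa [PySem.Set.contains, List.contains_iff_mem] using hc
    cases hp : pvPick s with
    | none => rw [pvPick_eq_none.mp hp] at hmem; simp at hmem
    | some r =>
        have := pvPick_isMin hp x hmem
        simp only []
        rw [if_neg (by omega)]
  · rw [if_neg hc, pvPick_append_singleton]

theorem pvPick_ofList (l : List (Int × Int)) : pvPick (PySem.Set.ofList l) = pvPick l := by
  induction l using List.reverseRecOn with
  | nil => rfl
  | append_singleton l x ih =>
      have h : PySem.Set.ofList (l ++ [x]) = PySem.Set.add (PySem.Set.ofList l) x := by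
        rw [PySem.Set.ofList_eq_foldl, PySem.Set.ofList_eq_foldl, List.foldl_append]
        rfl
      rw [h, pvPick_add, ih, pvPick_append_singleton]

theorem pvSorted_find (tr : List (Int × Int)) (Q : (Int × Int) → Bool) :
    (PySem.List.sorted tr (fun p => p.1 + p.2)).find? Q = pvPick (tr.filter Q) := by
  induction tr using List.reverseRecOn with
  | nil => rfl
  | append_singleton l x ih =>
      have hs : PySem.List.sorted (l ++ [x]) (fun p => p.1 + p.2)
          = PySem.List.insertBy (fun a b => decide (a.1 + a.2 < b.1 + b.2)) x
              (PySem.List.sorted l (fun p => p.1 + p.2)) := by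
        rw [PySem.List.sorted_eq_foldl_insertBy, PySem.List.sorted_eq_foldl_insertBy,
          List.foldl_append]
        rfl
      rw [hs, pvInsertBy_find x Q _ (PySem.List.sorted_pairwise l _), ih,
        List.filter_append]
      cases hqx : Q x with
      | false => simp [hqx]
      | true =>
          simp only [List.filter_cons, hqx, if_true, List.filter_nil]
          rw [pvPick_append_singleton]
          cases hp : pvPick (l.filter Q) with
          | none => rfl
          | some r =>
              simp only []
              by_cases h : x.1 + x.2 < r.1 + r.2
              · rw [if_pos h, if_neg (by omega)]
              · rw [if_neg h, if_pos (by omega)]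

theorem pvFoldl_combine_some (l : List (Int × Int)) :
    ∀ m, l.foldl (fun (mejor : Option (Int × Int)) k =>
        match mejor with
        | none => some k
        | some m' => if k.1 + k.2 < m'.1 + m'.2 then some k else mejor) (some m) =
      match pvPick l with
      | none => some m
      | some r => if r.1 + r.2 < m.1 + m.2 then some r else some m := by
  induction l with
  | nil => intro m; rfl
  | cons x rest ih =>
      intro m
      simp only [List.foldl_cons, pvPick]
      by_cases h1 : x.1 + x.2 < m.1 + m.2
      · rw [if_pos h1, ih]
        cases hp : pvPick rest with
        | none => simp [h1]
        | some r =>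
            by_cases h2 : r.1 + r.2 < x.1 + x.2
            · simp [h2, show r.1 + r.2 < m.1 + m.2 by omega]
            · simp [h2, h1]
      · rw [if_neg h1, ih]
        cases hp : pvPick rest with
        | none => simp [h1]
        | some r =>
            by_cases h2 : r.1 + r.2 < x.1 + x.2
            · by_cases h3 : r.1 + r.2 < m.1 + m.2 <;> simp [h2, h3]
            · simp [h2, h1, show ¬ (r.1 + r.2 < m.1 + m.2) by omega]

theorem pvFoldl_combine_none (l : List (Int × Int)) :
    l.foldl (fun (mejor : Option (Int × Int)) k =>
        match mejor with
        | none => some k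
        | some m' => if k.1 + k.2 < m'.1 + m'.2 then some k else mejor) none = pvPick l := by
  cases l with
  | nil => rfl
  | cons x rest =>
      simp only [List.foldl_cons, pvFoldl_combine_some, pvPick]

theorem pvMejorB_eq (d : PySem.Dict (Int × Int) Int) (t : Int) (hnd : d.keys.Nodup) :
    pvMejorB d.items t = pvPick (d.keys.filter (pvQ d t)) := by
  unfold pvMejorB
  rw [PySem.Dict.items_eq_map_keys d hnd 0, List.foldl_map]
  have hcong : ∀ (acc : Option (Int × Int)) (k : Int × Int),
      (fun (mejor : Option (Int × Int)) (p : (Int × Int) × Int) =>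
        if p.2 > 0 ∧ p.1.1 - p.1.2 ≤ t ∧ t ≤ p.1.1 + p.1.2 then
          match mejor with
          | none => some p.1
          | some m => if p.1.1 + p.1.2 < m.1 + m.2 then some p.1 else mejor
        else mejor) acc ((fun k => (k, d.getD k 0)) k)
      = (fun (mejor : Option (Int × Int)) (k : Int × Int) =>
          if pvQ d t k then
            match mejor with
            | none => some k
            | some m' => if k.1 + k.2 < m'.1 + m'.2 then some k else mejor
          else mejor) acc k := by
    intro acc k
    simp only [pvQ]
    by_cases hq : t ≥ k.1 - k.2 ∧ t ≤ k.1 + k.2 ∧ d.getD k 0 > 0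
    · rw [if_pos (by tauto), if_pos (by simpa using hq)]
    · rw [if_neg (by tauto), if_neg (by simpa using hq)]
  refine Eq.trans (List.foldl_ext _ (fun (mejor : Option (Int × Int)) (k : Int × Int) =>
          if pvQ d t k = true then
            match mejor with
            | none => some k
            | some m' => if k.1 + k.2 < m'.1 + m'.2 then some k else mejor
          else mejor) none (fun acc k _ => hcong acc k)) ?_
  rw [PySem.List.foldl_if_eq_foldl_filter (p := pvQ d t)]
  exact pvFoldl_combine_none _

theorem pvBuscarA_eq_find (L : List (Int × Int)) (d : PySem.Dict (Int × Int) Int) (t : Int) :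
    pvBuscarA L d t = L.find? (pvQ d t) := by
  induction L with
  | nil => rfl
  | cons x rest ih =>
      rw [show pvBuscarA (x :: rest) d t
          = if t ≥ x.1 - x.2 ∧ t ≤ x.1 + x.2 ∧ d.getD x 0 > 0 then some x
            else pvBuscarA rest d t from rfl, List.find?_cons, ih]
      by_cases h : t ≥ x.1 - x.2 ∧ t ≤ x.1 + x.2 ∧ d.getD x 0 > 0
      · rw [if_pos h, show pvQ d t x = true from by simp only [pvQ, decide_eq_true_eq]; exact h]
      · rw [if_neg h, show pvQ d t x = false from by simp only [pvQ, decide_eq_false_iff_not]; exact h]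

theorem pvStep (tr : List (Int × Int)) (d : PySem.Dict (Int × Int) Int) (t : Int)
    (hk : d.keys = PySem.Set.ofList tr) (hnd : d.keys.Nodup) :
    pvBuscarA (pvOrdenarTiempos tr) d t = pvMejorB d.items t := by
  rw [pvBuscarA_eq_find, pvOrdenarTiempos, pvSorted_find, pvMejorB_eq d t hnd, hk,
    pvFilter_ofList, pvPick_ofList]

theorem pvLoop_eq (tr : List (Int × Int)) (ts : List Int) :
    ∀ (d : PySem.Dict (Int × Int) Int) (acc : List (Int × (Int × Int))),
    d.keys = PySem.Set.ofList tr → d.keys.Nodup →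
    pvLoopA (pvOrdenarTiempos tr) ts d acc = pvLoopB ts d acc := by
  induction ts with
  | nil => intro d acc _ _; rfl
  | cons t rest ih =>
      intro d acc hk hnd
      simp only [pvLoopA, pvLoopB, pvStep tr d t hk hnd]
      cases hm : pvMejorB d.items t with
      | none => rfl
      | some m =>
          have hpick : pvPick (d.keys.filter (pvQ d t)) = some m := by
            rw [← pvMejorB_eq d t hnd]; exact hm
          have hqm : pvQ d t m = true := (List.mem_filter.mp (pvPick_mem hpick)).2
          have hpos : d.getD m 0 > 0 := by
            simp only [pvQ, decide_eq_true_eq] at hqm; exact hqm.2.2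
          have hcont : d.contains m = true := by
            by_contra hc
            simp only [Bool.not_eq_true] at hc
            rw [PySem.Dict.getD_of_not_contains d 0 hc] at hpos
            omega
          have hkeys := PySem.Dict.keys_insert_of_contains d (k := m) (d.getD m 0 - 1) hcont
          exact ih _ _ (hkeys ▸ hk) (hkeys ▸ hnd)

theorem pvCountsB_eq_counter (tr : List (Int × Int)) :
    pvCountsB tr = PySem.Dict.counter tr := by
  rw [pvCountsB, ← PySem.Dict.foldl_insert_getD_add_one_eq_counter tr]
  refine List.foldl_ext _ _ _ (fun d tran _ => ?_)
  by_cases hc : d.contains tran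
  · rw [if_pos hc]
  · rw [if_neg hc, PySem.Dict.getD_of_not_contains d 0 (by simpa using hc)]
    norm_num

-- ===== VERDICT (by name: the statement is the Claim_ definition above) =====
theorem es_culpable_spec : Claim_equal_es_culpable := by
  intro tr ts _
  show es_culpable tr ts = es_culpable_alt tr ts
  unfold es_culpable es_culpable_alt
  rw [show pvDicTransacciones tr = PySem.Dict.counter tr from
      PySem.Dict.foldl_insert_getD_add_one_eq_counter tr,
    show pvCountsB tr = PySem.Dict.counter tr from pvCountsB_eq_counter tr]
  exact pvLoop_eq tr ts _ [] (PySem.Dict.keys_counter tr) (PySem.Dict.nodup_keys_counter tr)
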